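-- pv_equiv track=rewrite | github.com/Ranks123/hex-workbench | app.py | replace_numeric_or_placeholder_path
-- ===== SOURCE A (Python) =====
-- def replace_numeric_or_placeholder_path(path: str, new_value: str):
--     text = str(path or "").strip()
--     if not text:
--         return text
--
--     segments = text.strip("/").split("/")
--     replaced = False
--
--     for i, seg in enumerate(segments):
--         lower_seg = seg.lower()
--
--         if seg == "{id}" or seg == ":id" or lower_seg == "nan":
--             segments[i] = str(new_value)
--             replaced = True
--             break
--
--     if not replaced:
--         for i, seg in enumerate(segments):
--             if seg.isdigit():
--                 segments[i] = str(new_value)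
--                 replaced = True
--                 break
--
--     if not replaced:
--         return text
--
--     return "/" + "/".join(segments)
-- ===== SOURCE B (Python) =====
-- def replace_numeric_or_placeholder_path(path: str, new_value: str):
--     text = str(path or "").strip()
--     if not text:
--         return text
--
--     segments = text.strip("/").split("/")
--
--     # one pass: remember the first placeholder index and the first numeric index
--     placeholder_idx = None
--     numeric_idx = None
--     for i, seg in enumerate(segments):
--         if placeholder_idx is None and (seg in ("{id}", ":id") or seg.lower() == "nan"):
--             placeholder_idx = i
--         if numeric_idx is None and seg.isdigit():
--             numeric_idx = i
--
--     idx = placeholder_idx if placeholder_idx is not None else numeric_idx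
--     if idx is None:
--         return text
--
--     segments[idx] = str(new_value)
--     return "/" + "/".join(segments)
-- ===== Notes on version B (the rewrite author's own statement) =====
-- stated objective: simpler
-- what changed: Replaces A's two sequential break-on-first-match scans (each rebuilding state) by a single pass that records the first placeholder index and the first digit index, then performs one replacement afterwards.
import Mathlib
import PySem

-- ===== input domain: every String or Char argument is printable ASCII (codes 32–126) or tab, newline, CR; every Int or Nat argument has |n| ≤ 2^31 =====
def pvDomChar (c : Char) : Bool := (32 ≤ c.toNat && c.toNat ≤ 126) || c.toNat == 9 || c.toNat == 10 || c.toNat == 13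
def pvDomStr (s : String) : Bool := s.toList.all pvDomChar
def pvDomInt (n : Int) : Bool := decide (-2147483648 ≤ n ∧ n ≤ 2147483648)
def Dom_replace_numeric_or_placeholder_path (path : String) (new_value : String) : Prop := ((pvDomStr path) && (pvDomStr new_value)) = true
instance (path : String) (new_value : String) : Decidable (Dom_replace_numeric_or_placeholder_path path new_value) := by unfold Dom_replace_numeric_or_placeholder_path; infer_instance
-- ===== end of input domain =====

-- B replaces A's two sequential break-on-first-match scans by a single pass that records
-- the first placeholder index and the first digit index (objective: simpler decomposition).

-- ===== PORT A =====
-- the placeholder test of A's first loop: seg == "{id}" or seg == ":id" or seg.lower() == "nan"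
def pvIsPh (seg : String) : Bool :=
  seg == "{id}" || seg == ":id" || PySem.Str.lower seg == "nan"

-- seg.isdigit()
def pvIsDig (seg : String) : Bool := PySem.Str.strIsdigit seg

-- A's first for-loop: replace the first placeholder segment in place and break
def pvAFind1 (nv : String) : List String → List String × Bool
  | [] => ([], false)
  | s :: rest =>
    if pvIsPh s then (nv :: rest, true)
    else
      let r := pvAFind1 nv rest
      (s :: r.1, r.2)

-- A's second for-loop: replace the first seg.isdigit() segment in place and break
def pvAFind2 (nv : String) : List String → List String × Bool
  | [] => ([], false)
  | s :: rest =>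
    if pvIsDig s then (nv :: rest, true)
    else
      let r := pvAFind2 nv rest
      (s :: r.1, r.2)

def replace_numeric_or_placeholder_path (path : String) (new_value : String) : String :=
  -- 'str(path or "")' is the identity here: path is a str, and "" stays "" under strip
  let text := PySem.Str.strip path
  if text == "" then text
  else
    -- "/" ≠ "", so split? always returns some; getD [] is exact
    let segments := (PySem.Str.split? (PySem.Str.stripChars text "/") "/").getD []
    let r1 := pvAFind1 new_value segments
    if r1.2 then "/" ++ PySem.Str.join "/" r1.1
    else
      let r2 := pvAFind2 new_value segments
      if r2.2 then "/" ++ PySem.Str.join "/" r2.1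
      else text

-- ===== PORT B =====
-- Source B's single for-loop over enumerate(segments), keeping the two None-initialised indices
def pvBScan : List String → Nat → Option Nat → Option Nat → Option Nat × Option Nat
  | [], _, ph, num => (ph, num)
  | s :: rest, i, ph, num =>
    let ph' := if ph.isNone && pvIsPh s then some i else ph
    let num' := if num.isNone && pvIsDig s then some i else num
    pvBScan rest (i + 1) ph' num'

def replace_numeric_or_placeholder_path_alt (path : String) (new_value : String) : String :=
  let text := PySem.Str.strip path
  if text == "" then text
  else
    let segments := (PySem.Str.split? (PySem.Str.stripChars text "/") "/").getD []
    let r := pvBScan segments 0 none none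
    match (match r.1 with | some i => some i | none => r.2) with
    | none => text
    | some i => "/" ++ PySem.Str.join "/" (segments.set i new_value)

-- ===== PRECONDITION & SPEC =====
def Spec_replace_numeric_or_placeholder_path (path : String) (new_value : String) (out : String) : Prop := out = replace_numeric_or_placeholder_path_alt path new_value
instance (path : String) (new_value : String) (out : String) : Decidable (Spec_replace_numeric_or_placeholder_path path new_value out) := by unfold Spec_replace_numeric_or_placeholder_path; infer_instance

-- ===== CLAIM (what is proved, stated in full; the proofs are below) =====
def Claim_equal_replace_numeric_or_placeholder_path : Prop := ∀ (path : String) (new_value : String), Dom_replace_numeric_or_placeholder_path path new_value → Spec_replace_numeric_or_placeholder_path path new_value (replace_numeric_or_placeholder_path path new_value)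

-- ===== LEMMAS AND PROOFS =====

-- first index (from a start offset) at which p holds
def pvFirstIdx (p : String → Bool) : List String → Nat → Option Nat
  | [], _ => none
  | s :: rest, i => if p s then some i else pvFirstIdx p rest (i + 1)

theorem pvBScan_eq (segs : List String) (i : Nat) (ph num : Option Nat) :
    pvBScan segs i ph num =
      ((match ph with | some a => some a | none => pvFirstIdx pvIsPh segs i),
       (match num with | some a => some a | none => pvFirstIdx (pvIsDig) segs i)) := by
  induction segs generalizing i ph num with
  | nil => cases ph <;> cases num <;> simp [pvBScan, pvFirstIdx]
  | cons s rest ih =>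
    cases ph <;> cases num <;>
      simp only [pvBScan, Option.isNone, Bool.true_and, Bool.false_and,
        pvFirstIdx] <;>
      rw [ih] <;> by_cases h1 : pvIsPh s <;> by_cases h2 : pvIsDig s <;>
      simp [h1, h2]

theorem pvFirstIdx_shift (p : String → Bool) (segs : List String) (i : Nat) :
    pvFirstIdx p segs (i + 1) = (pvFirstIdx p segs i).map (· + 1) := by
  induction segs generalizing i with
  | nil => simp [pvFirstIdx]
  | cons s rest ih =>
    by_cases h : p s <;> simp [pvFirstIdx, h, ih]

theorem pvAFind1_eq (nv : String) (segs : List String) :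
    pvAFind1 nv segs =
      match pvFirstIdx pvIsPh segs 0 with
      | some i => (segs.set i nv, true)
      | none => (segs, false) := by
  induction segs with
  | nil => simp [pvAFind1, pvFirstIdx]
  | cons s rest ih =>
    by_cases h : pvIsPh s
    · simp [pvAFind1, pvFirstIdx, h]
    · simp only [pvAFind1, pvFirstIdx, h, ih]
      rw [show (0 : Nat) + 1 = 0 + 1 from rfl, pvFirstIdx_shift]
      cases pvFirstIdx pvIsPh rest 0 <;> simp [List.set]

theorem pvAFind2_eq (nv : String) (segs : List String) :
    pvAFind2 nv segs =
      match pvFirstIdx (pvIsDig) segs 0 with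
      | some i => (segs.set i nv, true)
      | none => (segs, false) := by
  induction segs with
  | nil => simp [pvAFind2, pvFirstIdx]
  | cons s rest ih =>
    by_cases h : pvIsDig s
    · simp [pvAFind2, pvFirstIdx, h]
    · simp only [pvAFind2, pvFirstIdx, h, ih]
      rw [show (0 : Nat) + 1 = 0 + 1 from rfl, pvFirstIdx_shift]
      cases pvFirstIdx (pvIsDig) rest 0 <;> simp [List.set]

-- ===== VERDICT (by name: the statement is the Claim_ definition above) =====
theorem replace_numeric_or_placeholder_path_spec : Claim_equal_replace_numeric_or_placeholder_path := by
  intro path new_value _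
  unfold Spec_replace_numeric_or_placeholder_path
  unfold replace_numeric_or_placeholder_path replace_numeric_or_placeholder_path_alt
  by_cases ht : PySem.Str.strip path == ""
  · simp [ht]
  · simp only [ht]
    set segs := (PySem.Str.split? (PySem.Str.stripChars (PySem.Str.strip path) "/") "/").getD [] with hsegs
    rw [pvBScan_eq, pvAFind1_eq, pvAFind2_eq]
    cases h1 : pvFirstIdx pvIsPh segs 0 <;>
      cases h2 : pvFirstIdx (pvIsDig) segs 0 <;> simp
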